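-- pv_equiv track=rewrite | github.com/mos9527/pyncm | pyncm/utils/security.py | wm_apply_sbox_Sb
-- ===== SOURCE A (Python) =====
-- WEAPI_WATCHMAN_PAD = 5
--
-- WEAPI_WATCHMAN_SBOX = 'LPc4uQNptC2A6y.R90DOBIroS+qnx/eb3FM8fW1UZG7VmwvksgjhaTKzlXdiYEHJ'
--
-- def wm_sbox_Qb(e, c, d=0, r=WEAPI_WATCHMAN_SBOX, g=WEAPI_WATCHMAN_PAD):
--     # s-box
--     h, m,g = 0,[],str(g)
--     def push(*a):m.extend(a)
--     if d == 1:
--         d = e[c];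
--         h = 0;
--         push(r[ d >> 2 & 63], r[(d << 4 & 48) + (h >> 4 & 15)], g, g)
--     elif d == 2:
--         d = e[c];
--         h = e[c + 1];
--         e = 0;
--         push(r[d >> 2 & 63], r[(d << 4 & 48) + (h >> 4 & 15)], r[(h << 2 & 60) + (e >> 6 & 3)], g)
--     elif d == 3:
--         d = e[c];
--         h = e[c + 1];
--         e = e[c + 2];
--         push(r[d >> 2 & 63], r[(d << 4 & 48) + (h >> 4 & 15)], r[(h << 2 & 60) + (e >> 6 & 3)], r[e & 63])
--     else:
--         return None
--     return ''.join(m)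
--
-- def wm_apply_sbox_Sb(e, c=[], d=WEAPI_WATCHMAN_PAD):
--     # applies sbox to input e
--     r = 3
--     h = 0
--     g = []
--     while (h < len(e)):
--         if (h + r <= len(e)):
--             g.append(wm_sbox_Qb(e, h, r, c, d))
--             h += r
--         else:
--             g.append(wm_sbox_Qb(e, h, len(e) - h, c, d));
--             break
--     return "".join(g)
-- ===== SOURCE B (Python) =====
-- WEAPI_WATCHMAN_PAD = 5
--
-- def wm_apply_sbox_Sb(e, c=[], d=WEAPI_WATCHMAN_PAD):
--     # single-pass bit-accumulator base64 encoder over the alphabet c with pad str(d)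
--     out = []
--     acc = 0
--     bits = 0
--     for x in e:
--         acc = (acc << 8) + (x & 255)
--         bits += 8
--         while bits >= 6:
--             bits -= 6
--             out.append(c[(acc >> bits) & 63])
--     if bits:
--         out.append(c[(acc << (6 - bits)) & 63])
--         out.append(str(d) * ((3 - len(e) % 3) % 3))
--     return ''.join(out)
-- ===== Notes on version B (the rewrite author's own statement) =====
-- stated objective: alternative
-- what changed: Replaces the 3-byte-chunk helper with fixed per-offset shift/mask formulas (wm_sbox_Qb dispatching on chunk length 1/2/3) by one linear pass keeping a running bit accumulator that emits a character whenever 6 bits are available, with a uniform tail/padding step.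
import Mathlib
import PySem

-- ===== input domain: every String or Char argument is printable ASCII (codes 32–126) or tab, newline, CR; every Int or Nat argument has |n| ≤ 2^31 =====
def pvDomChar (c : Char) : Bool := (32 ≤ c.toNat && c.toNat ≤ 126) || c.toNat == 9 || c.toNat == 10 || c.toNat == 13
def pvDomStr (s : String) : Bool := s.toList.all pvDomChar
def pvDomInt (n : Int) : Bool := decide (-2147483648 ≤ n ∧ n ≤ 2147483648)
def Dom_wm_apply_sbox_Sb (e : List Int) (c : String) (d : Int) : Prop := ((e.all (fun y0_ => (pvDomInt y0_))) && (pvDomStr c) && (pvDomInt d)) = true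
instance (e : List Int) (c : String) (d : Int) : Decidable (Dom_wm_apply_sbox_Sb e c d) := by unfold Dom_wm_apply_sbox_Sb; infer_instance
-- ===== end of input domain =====

-- B re-implements A's 3-byte-chunk s-box helper as one linear pass with a running
-- bit accumulator (same cost, different decomposition); return values proved equal.

-- shared one-char indexing helper: Python's r[i] for one character
-- (out-of-range = IndexError in Python = [] here; such inputs are excluded by Pre_)
def sboxChar (r : List Char) (i : Int) : List Char :=
  match PySem.List.pyGet? r i with
  | some ch => [ch]
  | none => []

-- ===== PORT A =====
-- wm_sbox_Qb(e, c, d, r, g): chunk encoder dispatching on chunk length d ∈ {1,2,3}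
-- (Python's `x >> k`/`x << k` are `>>> k`/`<<< k`, `x & m` is PySem.Int.band x m)
def wm_sbox_Qb (e : List Int) (c : Int) (d : Int) (r : List Char) (g : Int) : List Char :=
  let gs := PySem.Int.toChars g
  if d = 1 then
    let d1 := (PySem.List.pyGet? e c).getD 0
    let h : Int := 0
    sboxChar r (PySem.Int.band (d1 >>> (2:ℕ)) 63) ++
      sboxChar r (PySem.Int.band (d1 <<< (4:ℕ)) 48 + PySem.Int.band (h >>> (4:ℕ)) 15) ++ gs ++ gs
  else if d = 2 then
    let d1 := (PySem.List.pyGet? e c).getD 0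
    let h := (PySem.List.pyGet? e (c + 1)).getD 0
    let e1 : Int := 0
    sboxChar r (PySem.Int.band (d1 >>> (2:ℕ)) 63) ++
      sboxChar r (PySem.Int.band (d1 <<< (4:ℕ)) 48 + PySem.Int.band (h >>> (4:ℕ)) 15) ++
      sboxChar r (PySem.Int.band (h <<< (2:ℕ)) 60 + PySem.Int.band (e1 >>> (6:ℕ)) 3) ++ gs
  else if d = 3 then
    let d1 := (PySem.List.pyGet? e c).getD 0
    let h := (PySem.List.pyGet? e (c + 1)).getD 0
    let e1 := (PySem.List.pyGet? e (c + 2)).getD 0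
    sboxChar r (PySem.Int.band (d1 >>> (2:ℕ)) 63) ++
      sboxChar r (PySem.Int.band (d1 <<< (4:ℕ)) 48 + PySem.Int.band (h >>> (4:ℕ)) 15) ++
      sboxChar r (PySem.Int.band (h <<< (2:ℕ)) 60 + PySem.Int.band (e1 >>> (6:ℕ)) 3) ++
      sboxChar r (PySem.Int.band e1 63)
  else []  -- Python returns None; unreachable from wm_apply_sbox_Sb's calls

-- the while-loop of wm_apply_sbox_Sb, collecting the joined chunks
def wm_sbox_loop (e : List Int) (r : List Char) (g : Int) (h : Nat) : List Char :=
  if h < e.length then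
    if h + 3 ≤ e.length then
      wm_sbox_Qb e h 3 r g ++ wm_sbox_loop e r g (h + 3)
    else
      wm_sbox_Qb e h ((e.length : Int) - h) r g
  else []
termination_by e.length - h

def wm_apply_sbox_Sb (e : List Int) (c : String) (d : Int) : String :=
  String.mk (wm_sbox_loop e c.toList d 0)

-- ===== PORT B =====
-- inner `while bits >= 6` loop of Source B
def wm_alt_emit (cl : List Char) (acc : Int) (bits : Nat) (out : List Char) : Nat × List Char :=
  if 6 ≤ bits then
    wm_alt_emit cl acc (bits - 6) (out ++ sboxChar cl (PySem.Int.band (acc >>> (bits - 6)) 63))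
  else (bits, out)
termination_by bits

-- body of Source B's `for x in e` loop: acc = (acc << 8) + (x & 255); bits += 8; emit
def wm_alt_step (cl : List Char) (st : Int × Nat × List Char) (x : Int) : Int × Nat × List Char :=
  let acc := (st.1 <<< (8:ℕ)) + PySem.Int.band x 255
  let eo := wm_alt_emit cl acc (st.2.1 + 8) st.2.2
  (acc, eo.1, eo.2)

-- Source B's `if bits:` tail: flush the leftover bits and append str(d) pads
def wm_alt_finish (cl : List Char) (d : Int) (n : Nat) (st : Int × Nat × List Char) : List Char :=
  if st.2.1 ≠ 0 then
    st.2.2 ++ sboxChar cl (PySem.Int.band (st.1 <<< (6 - st.2.1)) 63) ++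
      PySem.List.pyRepeat (PySem.Int.toChars d) (PySem.Int.mod (3 - PySem.Int.mod (n : Int) 3) 3)
  else st.2.2

def wm_apply_sbox_Sb_alt (e : List Int) (c : String) (d : Int) : String :=
  String.mk (wm_alt_finish c.toList d e.length (e.foldl (wm_alt_step c.toList) (0, 0, [])))

-- ===== PRECONDITION & SPEC =====
-- the four alphabet indices a 3-byte chunk (a, b, cc) uses (they are always ≥ 0)
def pvIdx1 (a : Int) : Int := PySem.Int.band (a >>> (2:ℕ)) 63
def pvIdx2 (a b : Int) : Int := PySem.Int.band (a <<< (4:ℕ)) 48 + PySem.Int.band (b >>> (4:ℕ)) 15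
def pvIdx3 (b cc : Int) : Int := PySem.Int.band (b <<< (2:ℕ)) 60 + PySem.Int.band (cc >>> (6:ℕ)) 3
def pvIdx4 (cc : Int) : Int := PySem.Int.band cc 63

-- exactly the inputs on which Python A returns: every alphabet index any chunk
-- looks up is inside c (otherwise Python raises IndexError, e.g. with the empty default c)
def Pre_wm_apply_sbox_Sb (e : List Int) (c : String) (d : Int) : Prop :=
  ∀ j, j < e.length → j % 3 = 0 →
    (pvIdx1 (e.getD j 0) < (c.toList.length : Int) ∧
     pvIdx2 (e.getD j 0) (e.getD (j + 1) 0) < (c.toList.length : Int) ∧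
     (j + 1 < e.length → pvIdx3 (e.getD (j + 1) 0) (e.getD (j + 2) 0) < (c.toList.length : Int)) ∧
     (j + 2 < e.length → pvIdx4 (e.getD (j + 2) 0) < (c.toList.length : Int)))
instance (e : List Int) (c : String) (d : Int) : Decidable (Pre_wm_apply_sbox_Sb e c d) := by
  unfold Pre_wm_apply_sbox_Sb; infer_instance

def pvWitness_wm_apply_sbox_Sb : List Int × String × Int :=
  ([72, 105], "ABCDEFGHIJKLMNOPQRSTUVWXYZabcdefghijklmnopqrstuvwxyz0123456789+/", 5)

def Spec_wm_apply_sbox_Sb (e : List Int) (c : String) (d : Int) (out : String) : Prop := out = wm_apply_sbox_Sb_alt e c d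
instance (e : List Int) (c : String) (d : Int) (out : String) : Decidable (Spec_wm_apply_sbox_Sb e c d out) := by unfold Spec_wm_apply_sbox_Sb; infer_instance

-- ===== CLAIM (what is proved, stated in full; the proofs are below) =====
def Claim_equal_wm_apply_sbox_Sb : Prop := ∀ (e : List Int) (c : String) (d : Int), Dom_wm_apply_sbox_Sb e c d → Pre_wm_apply_sbox_Sb e c d → Spec_wm_apply_sbox_Sb e c d (wm_apply_sbox_Sb e c d)

-- ===== LEMMAS AND PROOFS =====

theorem pv_nat_and_mask (n k j : ℕ) (h : j ≤ k) :
    n &&& (2 ^ k - 2 ^ j) = n % 2 ^ k - n % 2 ^ j := by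
  have hkj : 2 ^ (k - j) * 2 ^ j = 2 ^ k := by
    rw [← pow_add, Nat.sub_add_cancel h]
  have hmask : 2 ^ k - 2 ^ j = (2 ^ (k - j) - 1) <<< j := by
    rw [Nat.shiftLeft_eq, Nat.sub_mul, one_mul, hkj]
  have hrhs : n % 2 ^ k - n % 2 ^ j = (n / 2 ^ j % 2 ^ (k - j)) <<< j := by
    rw [Nat.shiftLeft_eq]
    have h1 : n % 2 ^ k = n % 2 ^ j + 2 ^ j * (n / 2 ^ j % 2 ^ (k - j)) := by
      rw [← hkj, mul_comm (2 ^ (k - j)) (2 ^ j), Nat.mod_mul]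
    rw [h1, mul_comm]
    omega
  rw [hmask, hrhs]
  apply Nat.eq_of_testBit_eq
  intro i
  rw [Nat.testBit_and, Nat.testBit_shiftLeft, Nat.testBit_shiftLeft]
  by_cases hji : j ≤ i
  · have hij : i - j + j = i := by omega
    simp only [hji, decide_true, Bool.true_and,
      Nat.testBit_two_pow_sub_one, Nat.testBit_mod_two_pow]
    rw [Nat.testBit_div_two_pow, hij]
    by_cases hik : i - j < k - j <;> simp [hik, Bool.and_comm]
  · simp [hji, ge_iff_le]

theorem pv_nat_mod_le_mod (n k j : ℕ) (h : j ≤ k) : n % 2 ^ j ≤ n % 2 ^ k := by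
  have hkj : 2 ^ j * 2 ^ (k - j) = 2 ^ k := by
    rw [← pow_add, Nat.add_sub_cancel' h]
  rw [← hkj, Nat.mod_mul]
  omega

theorem pv_emod_neg_pair (x p : ℤ) (hp : 0 < p) : x % p + (-x - 1) % p = p - 1 := by
  have h2 : 0 ≤ x % p := Int.emod_nonneg _ (by omega)
  have h3 : x % p < p := Int.emod_lt_of_pos _ hp
  have he : -x - 1 = (p - x % p - 1) + p * (-(x / p) - 1) := by
    have hd := Int.emod_add_mul_ediv x p
    rw [mul_sub, mul_neg, mul_one]
    omega
  have h4 : (-x - 1) % p = (p - x % p - 1) % p := by rw [he, Int.add_mul_emod_self_left]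
  rw [h4, Int.emod_eq_of_lt (a := p - x % p - 1) (b := p) (by omega) (by omega)]
  omega

theorem pv_band_mask (x : ℤ) (k j : ℕ) (h : j ≤ k) :
    PySem.Int.band x ((2 : ℤ) ^ k - 2 ^ j) = x % 2 ^ k - x % 2 ^ j := by
  have hJK : (2:ℕ) ^ j ≤ 2 ^ k := Nat.pow_le_pow_right (by norm_num) h
  have hJ1 : (1:ℕ) ≤ 2 ^ j := Nat.one_le_two_pow
  have hcast : ((2:ℤ) ^ k - 2 ^ j) = ((2 ^ k - 2 ^ j : ℕ) : ℤ) := by push_cast [hJK]; ring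
  have hm : (0 : ℤ) ≤ 2 ^ k - 2 ^ j := by rw [hcast]; positivity
  have hmt : ((2:ℤ) ^ k - 2 ^ j).toNat = 2 ^ k - 2 ^ j := by rw [hcast, Int.toNat_natCast]
  unfold PySem.Int.band
  by_cases hx : 0 ≤ x
  · simp only [hx, hm, if_true]
    rw [hmt, pv_nat_and_mask _ _ _ h]
    have h1 := pv_nat_mod_le_mod x.toNat k j h
    have hxx : ((x.toNat : ℕ) : ℤ) = x := by omega
    have e1 : x % 2 ^ k = ((x.toNat % 2 ^ k : ℕ) : ℤ) := by push_cast [hxx]; ring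
    have e2 : x % 2 ^ j = ((x.toNat % 2 ^ j : ℕ) : ℤ) := by push_cast [hxx]; ring
    rw [e1, e2]
    push_cast [h1]
    ring
  · simp only [hx, hm, if_true, if_false]
    have hw : (0:ℤ) ≤ -x - 1 := by omega
    set w : ℕ := (-x - 1).toNat with hwdef
    have hwx : (w : ℤ) = -x - 1 := by omega
    rw [hmt, Nat.and_comm, pv_nat_and_mask _ _ _ h]
    have h1 := pv_nat_mod_le_mod w k j h
    have h2 : (-x - 1) % 2 ^ k = ((w % 2 ^ k : ℕ) : ℤ) := by push_cast [hwx]; ring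
    have h3 : (-x - 1) % 2 ^ j = ((w % 2 ^ j : ℕ) : ℤ) := by push_cast [hwx]; ring
    have pk := pv_emod_neg_pair x (2 ^ k) (by positivity)
    have pj := pv_emod_neg_pair x (2 ^ j) (by positivity)
    have hwk : w % 2 ^ k < 2 ^ k := Nat.mod_lt _ (by positivity)
    have ek : (2:ℤ) ^ k = ((2 ^ k : ℕ) : ℤ) := by push_cast; ring
    have ej : (2:ℤ) ^ j = ((2 ^ j : ℕ) : ℤ) := by push_cast; ring
    have key : ∀ (A J t : ℕ), 0 < J → A < J * t → A - A % J ≤ J * t - J := by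
      intro A J t hJ hlt
      have hdivlt : A / J < t := Nat.div_lt_of_lt_mul hlt
      have hmm1 : J * (A / J) ≤ J * (t - 1) := Nat.mul_le_mul_left _ (by omega)
      have hmm2 := Nat.div_add_mod A J
      have hmm3 : J * (t - 1) = J * t - J := by rw [Nat.mul_sub, mul_one]
      omega
    have hand : w % 2 ^ k - w % 2 ^ j ≤ 2 ^ k - 2 ^ j := by
      have hBA : w % 2 ^ j = (w % 2 ^ k) % 2 ^ j := (Nat.mod_mod_of_dvd w (pow_dvd_pow 2 h)).symm
      have hk2 : (2:ℕ) ^ j * 2 ^ (k - j) = 2 ^ k := by rw [← pow_add, Nat.add_sub_cancel' h]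
      have hkey := key (w % 2 ^ k) (2 ^ j) (2 ^ (k - j)) (by positivity) (by rw [hk2]; exact hwk)
      rw [hk2] at hkey
      rw [hBA]
      exact hkey
    simp only [ek, ej] at pk pj h2 h3 ⊢
    generalize hA : w % 2 ^ k = A at h1 h2 hwk hand ⊢
    generalize hB : w % 2 ^ j = B at h1 h3 hand ⊢
    generalize hK : (2 : ℕ) ^ k = K at hJK hwk pk h2 hand ⊢
    generalize hJ : (2 : ℕ) ^ j = J at hJK hJ1 pj h3 hand ⊢
    omega

-- the concrete mask instances used by the two ports
theorem pv_band_255 (x : ℤ) : PySem.Int.band x 255 = x % 256 := by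
  have h := pv_band_mask x 8 0 (by norm_num)
  norm_num at h
  exact h
theorem pv_band_63 (x : ℤ) : PySem.Int.band x 63 = x % 64 := by
  have h := pv_band_mask x 6 0 (by norm_num)
  norm_num at h
  exact h
theorem pv_band_15 (x : ℤ) : PySem.Int.band x 15 = x % 16 := by
  have h := pv_band_mask x 4 0 (by norm_num)
  norm_num at h
  exact h
theorem pv_band_3 (x : ℤ) : PySem.Int.band x 3 = x % 4 := by
  have h := pv_band_mask x 2 0 (by norm_num)
  norm_num at h
  exact h
theorem pv_band_48 (x : ℤ) : PySem.Int.band x 48 = x % 64 - x % 16 := by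
  have h := pv_band_mask x 6 4 (by norm_num)
  norm_num at h
  exact h
theorem pv_band_60 (x : ℤ) : PySem.Int.band x 60 = x % 64 - x % 4 := by
  have h := pv_band_mask x 6 2 (by norm_num)
  norm_num at h
  exact h

theorem pv_shr (x : ℤ) (k : ℕ) : x >>> k = x / (2 ^ k : ℤ) := by
  rw [Int.shiftRight_eq_div_pow]
  push_cast
  ring_nf
theorem pv_shl (x : ℤ) (k : ℕ) : x <<< k = x * (2 ^ k : ℤ) := Int.shiftLeft_eq x k

-- common normal form: A's chunk stream, phrased as structural recursion on the list
def pvChunks (cl gs : List Char) : List Int → List Char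
  | [] => []
  | [a] => sboxChar cl (pvIdx1 a) ++ sboxChar cl (pvIdx2 a 0) ++ gs ++ gs
  | [a, b] => sboxChar cl (pvIdx1 a) ++ sboxChar cl (pvIdx2 a b) ++ sboxChar cl (pvIdx3 b 0) ++ gs
  | a :: b :: c2 :: rest =>
      sboxChar cl (pvIdx1 a) ++ sboxChar cl (pvIdx2 a b) ++ sboxChar cl (pvIdx3 b c2) ++
        sboxChar cl (pvIdx4 c2) ++ pvChunks cl gs rest

-- ===== A-side: the while-loop produces the chunk stream of the dropped prefix =====
theorem pv_A_eq (e : List Int) (r : List Char) (g : Int) (h : Nat) :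
    wm_sbox_loop e r g h = pvChunks r (PySem.Int.toChars g) (e.drop h) := by
  induction h using wm_sbox_loop.induct (e := e) with
  | case1 h hlt h3 ih =>
    have h1 : h + 1 < e.length := by omega
    have h2 : h + 2 < e.length := by omega
    rw [wm_sbox_loop, if_pos hlt, if_pos h3, ih,
      List.drop_eq_getElem_cons hlt, List.drop_eq_getElem_cons h1, List.drop_eq_getElem_cons h2]
    have c1 : ((h : Int) + 1) = ((h + 1 : Nat) : Int) := by push_cast; ring
    have c2 : ((h : Int) + 2) = ((h + 2 : Nat) : Int) := by push_cast; ring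
    simp only [wm_sbox_Qb, c1, c2, PySem.List.pyGet?_natCast,
      List.getElem?_eq_getElem, hlt, h1, h2, Option.getD_some, pvChunks,
      pvIdx1, pvIdx2, pvIdx3, pvIdx4]
    norm_num
  | case2 h hlt h3 =>
    have hcase : e.length = h + 1 ∨ e.length = h + 2 := by omega
    rw [wm_sbox_loop, if_pos hlt, if_neg h3]
    rcases hcase with hl | hl
    · have hd : e.drop h = [e[h]] := by
        rw [List.drop_eq_getElem_cons hlt, List.drop_of_length_le (by omega)]
      have hone : ((e.length : Int) - h) = 1 := by rw [hl]; push_cast; ring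
      rw [hone, hd]
      simp only [wm_sbox_Qb, PySem.List.pyGet?_natCast, List.getElem?_eq_getElem, hlt,
        Option.getD_some, pvChunks, pvIdx1, pvIdx2]
      norm_num
    · have h1 : h + 1 < e.length := by omega
      have hd : e.drop h = [e[h], e[h + 1]] := by
        rw [List.drop_eq_getElem_cons hlt, List.drop_eq_getElem_cons h1,
          List.drop_of_length_le (by omega)]
      have htwo : ((e.length : Int) - h) = 2 := by rw [hl]; push_cast; ring
      have c1 : ((h : Int) + 1) = ((h + 1 : Nat) : Int) := by push_cast; ring
      rw [htwo, hd]
      simp only [wm_sbox_Qb, c1, PySem.List.pyGet?_natCast, List.getElem?_eq_getElem, hlt, h1,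
        Option.getD_some, pvChunks, pvIdx1, pvIdx2, pvIdx3]
      norm_num
  | case3 h hlt =>
    rw [wm_sbox_loop, if_neg hlt, List.drop_of_length_le (by omega)]
    rfl

-- ===== B-side: evaluating the inner emit loop at its three reachable bit counts =====
theorem pv_emit_lt (cl : List Char) (acc : Int) (bits : Nat) (out : List Char) (h : bits < 6) :
    wm_alt_emit cl acc bits out = (bits, out) := by
  rw [wm_alt_emit, if_neg (by omega)]
theorem pv_emit8 (cl : List Char) (acc : Int) (out : List Char) :
    wm_alt_emit cl acc 8 out = (2, out ++ sboxChar cl (PySem.Int.band (acc >>> (2:ℕ)) 63)) := by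
  rw [wm_alt_emit, if_pos (by norm_num)]
  norm_num [pv_emit_lt]
theorem pv_emit10 (cl : List Char) (acc : Int) (out : List Char) :
    wm_alt_emit cl acc 10 out = (4, out ++ sboxChar cl (PySem.Int.band (acc >>> (4:ℕ)) 63)) := by
  rw [wm_alt_emit, if_pos (by norm_num)]
  norm_num [pv_emit_lt]
theorem pv_emit12 (cl : List Char) (acc : Int) (out : List Char) :
    wm_alt_emit cl acc 12 out =
      (0, out ++ sboxChar cl (PySem.Int.band (acc >>> (6:ℕ)) 63) ++
        sboxChar cl (PySem.Int.band acc 63)) := by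
  rw [wm_alt_emit, if_pos (by norm_num)]
  norm_num
  rw [wm_alt_emit, if_pos (by norm_num)]
  norm_num [pv_emit_lt, Int.shiftRight_zero]

-- ===== B-side: the emitted indices equal A's per-chunk indices =====
theorem pv_i1 (acc a : Int) :
    PySem.Int.band (((acc <<< (8:ℕ)) + PySem.Int.band a 255) >>> (2:ℕ)) 63 = pvIdx1 a := by
  simp only [pvIdx1, pv_band_255, pv_band_63, pv_shr, pv_shl]
  norm_num
  omega
theorem pv_i2 (acc a b : Int) :
    PySem.Int.band (((((acc <<< (8:ℕ)) + PySem.Int.band a 255) <<< (8:ℕ)) + PySem.Int.band b 255) >>> (4:ℕ)) 63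
      = pvIdx2 a b := by
  simp only [pvIdx2, pv_band_255, pv_band_63, pv_band_48, pv_band_15, pv_shr, pv_shl]
  norm_num
  omega
theorem pv_i3 (acc a b c2 : Int) :
    PySem.Int.band (((((((acc <<< (8:ℕ)) + PySem.Int.band a 255) <<< (8:ℕ)) + PySem.Int.band b 255) <<< (8:ℕ))
        + PySem.Int.band c2 255) >>> (6:ℕ)) 63 = pvIdx3 b c2 := by
  simp only [pvIdx3, pv_band_255, pv_band_63, pv_band_60, pv_band_3, pv_shr, pv_shl]
  norm_num
  omega
theorem pv_i4 (acc a b c2 : Int) :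
    PySem.Int.band ((((((acc <<< (8:ℕ)) + PySem.Int.band a 255) <<< (8:ℕ)) + PySem.Int.band b 255) <<< (8:ℕ))
        + PySem.Int.band c2 255) 63 = pvIdx4 c2 := by
  simp only [pvIdx4, pv_band_255, pv_band_63, pv_shl]
  norm_num
  omega
theorem pv_t1 (acc a : Int) :
    PySem.Int.band (((acc <<< (8:ℕ)) + PySem.Int.band a 255) <<< (4:ℕ)) 63 = pvIdx2 a 0 := by
  simp only [pvIdx2, pv_band_255, pv_band_63, pv_band_48, pv_band_15, pv_shr, pv_shl]
  norm_num
  omega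
theorem pv_t2 (acc a b : Int) :
    PySem.Int.band ((((acc <<< (8:ℕ)) + PySem.Int.band a 255) <<< (8:ℕ) + PySem.Int.band b 255) <<< (2:ℕ)) 63
      = pvIdx3 b 0 := by
  simp only [pvIdx3, pv_band_255, pv_band_63, pv_band_60, pv_band_3, pv_shr, pv_shl]
  norm_num
  omega

-- ===== B-side: the whole pass produces the chunk stream =====
theorem pv_B_eq (cl : List Char) (d : Int) (rest : List Int) (acc : Int) (out : List Char)
    (n : Nat) (hn : n % 3 = rest.length % 3) :
    wm_alt_finish cl d n (rest.foldl (wm_alt_step cl) (acc, 0, out))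
      = out ++ pvChunks cl (PySem.Int.toChars d) rest := by
  match rest with
  | [] =>
    simp [wm_alt_finish, pvChunks]
  | [a] =>
    have hn1 : (n : Int) % 3 = 1 := by
      have : n % 3 = 1 := by simpa using hn
      omega
    have hstep : List.foldl (wm_alt_step cl) (acc, 0, out) [a]
        = ((acc <<< (8:ℕ)) + PySem.Int.band a 255, 2, out ++ sboxChar cl (pvIdx1 a)) := by
      simp only [List.foldl, wm_alt_step, Nat.zero_add, pv_emit8, pv_i1]
    rw [hstep, wm_alt_finish]
    norm_num [hn1, PySem.Int.mod_eq_emod_of_pos (by norm_num : (0:ℤ) < 3), pv_t1,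
      PySem.List.pyRepeat, pvChunks, List.append_assoc, List.replicate, show Int.toNat 2 = 2 from rfl, show Int.toNat 1 = 1 from rfl]
  | [a, b] =>
    have hn2 : (n : Int) % 3 = 2 := by
      have : n % 3 = 2 := by simpa using hn
      omega
    have hstep : List.foldl (wm_alt_step cl) (acc, 0, out) [a, b]
        = (((acc <<< (8:ℕ)) + PySem.Int.band a 255) <<< (8:ℕ) + PySem.Int.band b 255, 4,
            out ++ sboxChar cl (pvIdx1 a) ++ sboxChar cl (pvIdx2 a b)) := by
      simp only [List.foldl, wm_alt_step, Nat.zero_add, pv_emit8, pv_i1]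
      norm_num [pv_emit10, pv_i2]
    rw [hstep, wm_alt_finish]
    norm_num [hn2, PySem.Int.mod_eq_emod_of_pos (by norm_num : (0:ℤ) < 3), pv_t2,
      PySem.List.pyRepeat, pvChunks, List.append_assoc, List.replicate, show Int.toNat 2 = 2 from rfl, show Int.toNat 1 = 1 from rfl]
  | a :: b :: c2 :: rest' =>
    have hn' : n % 3 = rest'.length % 3 := by
      simp only [List.length_cons] at hn
      omega
    have hstep : List.foldl (wm_alt_step cl) (acc, 0, out) (a :: b :: c2 :: rest')
        = List.foldl (wm_alt_step cl)
            ((((acc <<< (8:ℕ)) + PySem.Int.band a 255) <<< (8:ℕ) + PySem.Int.band b 255) <<< (8:ℕ)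
                + PySem.Int.band c2 255, 0,
              out ++ sboxChar cl (pvIdx1 a) ++ sboxChar cl (pvIdx2 a b) ++
                sboxChar cl (pvIdx3 b c2) ++ sboxChar cl (pvIdx4 c2)) rest' := by
      simp only [List.foldl, wm_alt_step, Nat.zero_add, pv_emit8, pv_i1]
      norm_num [pv_emit10, pv_emit12, pv_i2, pv_i3, pv_i4]
    rw [hstep, pv_B_eq cl d rest' _ _ n hn']
    simp [pvChunks, List.append_assoc]
termination_by rest.length

-- ===== VERDICT (by name: the statement is the Claim_ definition above) =====
theorem wm_apply_sbox_Sb_spec : Claim_equal_wm_apply_sbox_Sb := by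
  unfold Claim_equal_wm_apply_sbox_Sb
  intro e c d _ _
  unfold Spec_wm_apply_sbox_Sb wm_apply_sbox_Sb wm_apply_sbox_Sb_alt
  rw [pv_A_eq, pv_B_eq c.toList d e 0 [] e.length rfl]
  simp
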